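-- pv_equiv track=rewrite | github.com/Alexandr-Mazanik/SM-BosonSampler | block_boson_sampler.py | create_fock_basis
-- ===== SOURCE A (Python) =====
-- import itertools
--
-- def create_fock_basis(ph_num, modes_num):
--     basis = []
--     slots_num = ph_num + modes_num
--     all_comb_bars = list(itertools.combinations(range(1, slots_num), modes_num - 1))
--     for bars in all_comb_bars:
--         bars = list(bars)
--         bars.append(slots_num)
--         bars.insert(0, 0)
--         basis_vec = []
--         for i in range(modes_num):
--             basis_vec.append(bars[i + 1] - bars[i] - 1)
--         basis.append(basis_vec)
--
--     return basis
-- ===== SOURCE B (Python) =====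
-- def create_fock_basis(ph_num, modes_num):
--     if modes_num == 1:
--         return [[ph_num]]
--     basis = []
--     for v in range(ph_num + 1):
--         for rest in create_fock_basis(ph_num - v, modes_num - 1):
--             basis.append([v] + rest)
--     return basis
-- ===== Notes on version B (the rewrite author's own statement) =====
-- stated objective: alternative
-- what changed: Replaces the stars-and-bars enumeration via itertools.combinations and bar-difference arithmetic by a direct recursive enumeration of compositions: choose the first mode's count v = 0..ph_num and recurse on (ph_num - v, modes_num - 1).
import Mathlib
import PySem

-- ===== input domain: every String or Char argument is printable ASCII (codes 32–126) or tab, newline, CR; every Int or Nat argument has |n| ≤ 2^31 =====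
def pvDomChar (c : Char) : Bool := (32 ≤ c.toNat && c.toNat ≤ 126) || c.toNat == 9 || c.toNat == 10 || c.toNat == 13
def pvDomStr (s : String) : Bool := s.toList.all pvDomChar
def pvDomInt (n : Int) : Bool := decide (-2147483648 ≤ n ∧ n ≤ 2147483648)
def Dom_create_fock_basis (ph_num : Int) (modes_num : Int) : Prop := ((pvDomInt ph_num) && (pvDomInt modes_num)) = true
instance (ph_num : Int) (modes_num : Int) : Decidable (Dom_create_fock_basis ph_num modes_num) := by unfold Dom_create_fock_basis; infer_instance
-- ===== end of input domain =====

-- B replaces the combinations-of-bar-positions enumeration by a direct recursion on the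
-- number of modes (first mode's count varies outermost); same vectors in the same order.

-- ===== PORT A =====
-- itertools.combinations: same list as PySem.List.combinations (proved in comb_eq_combinations
-- below), written with CPython's early exit 'if r > n: return' so that it evaluates
def comb (xs : List Int) (r : Nat) : List (List Int) :=
  match r, xs with
  | 0, _ => [[]]
  | _ + 1, [] => []
  | r + 1, x :: xs =>
    if xs.length < r then [] else (comb xs r).map (x :: ·) ++ comb xs (r + 1)

def create_fock_basis (ph_num : Int) (modes_num : Int) : List (List Int) :=
  let slots_num := ph_num + modes_num
  let all_comb_bars :=
    comb (PySem.List.pyRange 1 slots_num 1) (modes_num - 1).toNat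
  all_comb_bars.foldl (fun basis bars =>
    let bars := bars ++ [slots_num]
    let bars := PySem.List.insert bars 0 0
    let basis_vec := (PySem.List.pyRange 0 modes_num 1).foldl
      (fun acc i =>
        acc ++ [PySem.List.pyGetD bars (i + 1) 0 - PySem.List.pyGetD bars i 0 - 1]) []
    basis ++ [basis_vec]) []

-- ===== PORT B =====
-- recursion depth modes_num - 1 becomes the Nat index (Pre_ demands 1 ≤ modes_num)
def fockRec (ph : Int) : Nat → List (List Int)
  | 0 => [[ph]]
  | m + 1 =>
    (PySem.List.pyRange 0 (ph + 1) 1).foldl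
      (fun basis v => basis ++ (fockRec (ph - v) m).map (fun rest => v :: rest)) []

def create_fock_basis_alt (ph_num : Int) (modes_num : Int) : List (List Int) :=
  fockRec ph_num (modes_num - 1).toNat

-- ===== PRECONDITION & SPEC =====
-- Pre_ excludes modes_num ≤ 0, where A raises ValueError (combinations with negative r).
def Pre_create_fock_basis (ph_num : Int) (modes_num : Int) : Prop := 1 ≤ modes_num
instance (ph_num : Int) (modes_num : Int) : Decidable (Pre_create_fock_basis ph_num modes_num) := by
  unfold Pre_create_fock_basis; infer_instance
def pvWitness_create_fock_basis : Int × Int := (2, 2)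

def Spec_create_fock_basis (ph_num : Int) (modes_num : Int) (out : List (List Int)) : Prop :=
  out = create_fock_basis_alt ph_num modes_num
instance (ph_num : Int) (modes_num : Int) (out : List (List Int)) : Decidable (Spec_create_fock_basis ph_num modes_num out) := by
  unfold Spec_create_fock_basis; infer_instance

-- ===== CLAIM (what is proved, stated in full; the proofs are below) =====
def Claim_equal_create_fock_basis : Prop :=
  ∀ (ph_num : Int) (modes_num : Int), Dom_create_fock_basis ph_num modes_num →
    Pre_create_fock_basis ph_num modes_num →
    Spec_create_fock_basis ph_num modes_num (create_fock_basis ph_num modes_num)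

-- ===== LEMMAS AND PROOFS =====

-- successive differences minus one along a bar list
def diffs : List Int → List Int
  | a :: b :: rest => (b - a - 1) :: diffs (b :: rest)
  | _ => []

-- bump the head of a vector by one
def incrHead : List Int → List Int
  | [] => []
  | x :: t => (x + 1) :: t

theorem diffs_shift (prev : Int) (c : Int) (r : List Int) :
    diffs (prev :: c :: r) = incrHead (diffs ((prev + 1) :: c :: r)) := by
  simp [diffs, incrHead]; ring

theorem inner_map (m : Nat) : ∀ (bs : List Int), bs.length = m + 1 →
    (List.range m).map (fun k => bs.getD (k + 1) 0 - bs.getD k 0 - 1) = diffs bs := by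
  induction m with
  | zero =>
    intro bs h
    match bs, h with
    | [a], _ => simp [diffs]
  | succ m ih =>
    intro bs h
    match bs, h with
    | a :: b :: rest, h =>
      have h2 : (b :: rest).length = m + 1 := by simpa using h
      rw [List.range_succ_eq_map, List.map_cons, List.map_map, diffs]
      congr 1
      rw [← ih (b :: rest) h2]
      apply List.map_congr_left
      intro k _
      simp [Function.comp, List.getD]

theorem inner_loop (mi : Int) (m : Nat) (hm : mi = (m : Int)) (bs : List Int)
    (h : bs.length = m + 1) :
    (PySem.List.pyRange 0 mi 1).foldl
      (fun acc i =>
        acc ++ [PySem.List.pyGetD bs (i + 1) 0 - PySem.List.pyGetD bs i 0 - 1]) []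
      = diffs bs := by
  subst hm
  rw [PySem.List.foldl_append_singleton_eq_map]
  rw [PySem.List.pyRange_one]
  simp only [List.map_map, Int.sub_zero, Int.toNat_natCast, List.nil_append]
  rw [← inner_map m bs h]
  apply List.map_congr_left
  intro k _
  simp only [Function.comp, zero_add]
  have h1 : ((k : Int) + 1) = ((k + 1 : Nat) : Int) := by push_cast; ring
  rw [h1, PySem.List.pyGetD_natCast, PySem.List.pyGetD_natCast]

theorem fockRec_split (ph : Int) (k : Nat) (hk : 0 ≤ ph ∨ 1 ≤ k) :
    fockRec ph (k + 1)
      = (fockRec ph k).map (fun r => 0 :: r) ++ (fockRec (ph - 1) (k + 1)).map incrHead := by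
  by_cases hph : 0 ≤ ph
  · rw [fockRec]
    rw [PySem.List.foldl_append_eq_flatMap]
    rw [PySem.List.pyRange_one_cons (by omega)]
    simp only [List.nil_append, List.flatMap_cons, Int.sub_zero]
    congr 1
    rw [fockRec, PySem.List.foldl_append_eq_flatMap]
    simp only [List.nil_append, List.map_flatMap, List.map_map]
    rw [PySem.List.pyRange_one, PySem.List.pyRange_one]
    have hb : (ph + 1 - (0 + 1)).toNat = (ph - 1 + 1 - 0).toNat := by omega
    rw [hb]
    simp only [List.flatMap_map]
    congr 1
    funext j
    have harg : ph - (0 + 1 + (j : Int)) = ph - 1 - (0 + (j : Int)) := by ring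
    simp only [harg]
    congr 1
    funext r
    simp only [Function.comp, incrHead]
    congr 1
    omega
  · -- ph < 0: with 1 ≤ k all three lists are empty
    obtain hk1 : 1 ≤ k := by tauto
    obtain ⟨k', rfl⟩ : ∃ k', k = k' + 1 := ⟨k - 1, by omega⟩
    rw [fockRec, fockRec, fockRec]
    rw [PySem.List.pyRange_one_eq_nil (show (ph + 1 : Int) ≤ 0 by omega),
        PySem.List.pyRange_one_eq_nil (show (ph - 1 + 1 : Int) ≤ 0 by omega)]
    simp

theorem comb_eq_combinations : ∀ (r : Nat) (xs : List Int),
    comb xs r = PySem.List.combinations xs r := by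
  intro r
  induction r with
  | zero => intro xs; rw [comb, PySem.List.combinations_zero]
  | succ r ih =>
    intro xs
    induction xs with
    | nil => rw [comb, PySem.List.combinations_nil_succ]
    | cons x xs ihx =>
      rw [comb, PySem.List.combinations_cons_succ, ih, ihx]
      split_ifs with h
      · rw [PySem.List.combinations_eq_nil_of_length_lt _ (by omega : xs.length < r),
            PySem.List.combinations_eq_nil_of_length_lt _ (by omega : xs.length < r + 1)]
        simp
      · rfl

theorem main_lemma : ∀ (n : Nat) (prev s : Int) (k : Nat), s - prev ≤ (n : Int) →
    (PySem.List.combinations (PySem.List.pyRange (prev + 1) s 1) k).map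
        (fun bars => diffs (prev :: (bars ++ [s])))
      = fockRec (s - prev - 1 - k) k := by
  intro n
  induction n with
  | zero =>
    intro prev s k hn
    cases k with
    | zero => simp [PySem.List.combinations_zero, fockRec, diffs]
    | succ k =>
      rw [PySem.List.pyRange_one_eq_nil (by omega), PySem.List.combinations_nil_succ]
      rw [fockRec, PySem.List.pyRange_one_eq_nil (by omega)]
      simp
  | succ n ih =>
    intro prev s k hn
    cases k with
    | zero => simp [PySem.List.combinations_zero, fockRec, diffs]
    | succ k =>
      by_cases hs : s ≤ prev + 1
      · rw [PySem.List.pyRange_one_eq_nil (by omega), PySem.List.combinations_nil_succ]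
        rw [fockRec, PySem.List.pyRange_one_eq_nil (by omega)]
        simp
      · -- prev + 1 < s
        rw [PySem.List.pyRange_one_cons (by omega), PySem.List.combinations_cons_succ]
        rw [List.map_append, List.map_map]
        have ih1 := ih (prev + 1) s k (by omega)
        have ih2 := ih (prev + 1) s (k + 1) (by omega)
        have e1 : (PySem.List.combinations (PySem.List.pyRange (prev + 1 + 1) s 1) k).map
            ((fun bars => diffs (prev :: (bars ++ [s]))) ∘ (fun l => (prev + 1) :: l))
            = (fockRec (s - (prev + 1) - 1 - k) k).map (fun r => 0 :: r) := by
          rw [← ih1, List.map_map]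
          apply List.map_congr_left
          intro bars _
          simp only [Function.comp]
          show diffs (prev :: (prev + 1) :: (bars ++ [s]))
              = 0 :: diffs ((prev + 1) :: (bars ++ [s]))
          rw [diffs]
          norm_num
        have e2 : (PySem.List.combinations (PySem.List.pyRange (prev + 1 + 1) s 1) (k + 1)).map
            (fun bars => diffs (prev :: (bars ++ [s])))
            = (fockRec (s - (prev + 1) - 1 - ((k + 1 : Nat) : Int)) (k + 1)).map incrHead := by
          rw [← ih2, List.map_map]
          apply List.map_congr_left
          intro bars _
          simp only [Function.comp]
          cases bars with
          | nil => exact diffs_shift prev s []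
          | cons c r => exact diffs_shift prev c (r ++ [s])
        rw [e1, e2]
        have hA : s - (prev + 1) - 1 - ((k : Nat) : Int) = s - prev - 2 - (k : Nat) := by ring
        have hB : s - (prev + 1) - 1 - ((k + 1 : Nat) : Int)
            = s - prev - 2 - ((k : Nat) : Int) - 1 := by push_cast; ring
        have hC : s - prev - 1 - ((k + 1 : Nat) : Int) = s - prev - 2 - ((k : Nat) : Int) := by
          push_cast; ring
        rw [hA, hB, hC]
        exact (fockRec_split (s - prev - 2 - (k : Nat)) k (by omega)).symm

-- ===== VERDICT (by name: the statement is the Claim_ definition above) =====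
theorem create_fock_basis_spec : Claim_equal_create_fock_basis := by
  intro ph m _ hpre
  unfold Pre_create_fock_basis at hpre
  unfold Spec_create_fock_basis create_fock_basis_alt
  simp only [create_fock_basis]
  rw [PySem.List.foldl_append_singleton_eq_map]
  rw [comb_eq_combinations]
  have hstep : (PySem.List.combinations (PySem.List.pyRange (0 + 1) (ph + m) 1) (m - 1).toNat).map
      (fun bars => diffs ((0 : Int) :: (bars ++ [ph + m])))
      = fockRec (ph + m - 0 - 1 - (m - 1).toNat) (m - 1).toNat :=
    main_lemma (ph + m - 0).toNat 0 (ph + m) (m - 1).toNat (by omega)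
  have hm1 : ((m - 1).toNat : Int) = m - 1 := by omega
  rw [hm1] at hstep
  have harg : ph + m - 0 - 1 - (m - 1) = ph := by ring
  rw [harg] at hstep
  simp only [zero_add] at hstep
  rw [← hstep, List.nil_append]
  apply List.map_congr_left
  intro bars hmem
  have hlen : bars.length = (m - 1).toNat :=
    PySem.List.length_of_mem_combinations hmem
  rw [PySem.List.insert_zero]
  have hlen2 : ((0 : Int) :: (bars ++ [ph + m])).length = m.toNat + 1 := by
    simp [hlen]; omega
  exact inner_loop m m.toNat (by omega) ((0 : Int) :: (bars ++ [ph + m])) hlen2
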